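-- pv_equiv track=rewrite | github.com/armmahajan/advent-of-code-2025 | day3/solution.py | deleteWorst
-- ===== SOURCE A (Python) =====
-- def deleteWorst(numStr: str) -> str:
--     h = numStr[0]
--     t = numStr[1::]
--     if not t: return ''
--
--     if int(h) >= int(t[0]):
--         return h + deleteWorst(t)
--     else:
--         return t
-- ===== SOURCE B (Python) =====
-- def deleteWorst(numStr: str) -> str:
--     for i in range(len(numStr) - 1):
--         if int(numStr[i]) < int(numStr[i + 1]):
--             return numStr[:i] + numStr[i + 1:]
--     return numStr[:-1]
-- ===== Notes on version B (the rewrite author's own statement) =====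
-- stated objective: simpler
-- what changed: Replaces A's head-peeling recursion with repeated string concatenation by a single iterative scan for the first ascent that returns one slice splice (or drops the last char).
import Mathlib
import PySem

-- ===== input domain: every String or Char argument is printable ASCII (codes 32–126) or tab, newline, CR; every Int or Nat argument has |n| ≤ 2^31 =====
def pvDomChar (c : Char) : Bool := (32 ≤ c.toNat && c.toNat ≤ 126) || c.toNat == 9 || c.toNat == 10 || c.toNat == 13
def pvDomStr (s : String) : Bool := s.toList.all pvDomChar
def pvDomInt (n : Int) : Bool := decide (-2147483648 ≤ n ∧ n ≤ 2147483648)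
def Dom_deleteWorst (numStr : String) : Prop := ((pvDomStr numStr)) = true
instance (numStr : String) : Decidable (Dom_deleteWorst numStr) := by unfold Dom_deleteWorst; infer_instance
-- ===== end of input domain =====

-- B replaces A's head-peeling recursion (with O(n) concatenation per step) by a single
-- iterative scan returning one slice splice; equal on every input where A returns.

-- int(c) for a one-character string; `.getD 0` is junk for the ValueError case, which Pre_ excludes
def pvIntOfChar (c : Char) : Int := (PySem.Int.ofStr? (String.ofList [c])).getD 0

-- ===== PORT A =====
-- A's recursion, on the character list of numStr
def deleteWorstAux : List Char → List Char
  | [] => []                        -- numStr[0] raises IndexError here; excluded by Pre_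
  | [_h] => []                      -- t = numStr[1:] empty → return ''
  | h :: t0 :: t =>
      if pvIntOfChar h ≥ pvIntOfChar t0 then h :: deleteWorstAux (t0 :: t)
      else t0 :: t

def deleteWorst (numStr : String) : String := String.ofList (deleteWorstAux numStr.toList)

-- ===== PORT B =====
-- Source B's for-loop over range(len-1) with early return; i is the loop index (always in range here,
-- so s.getD i ' ' is exactly numStr[i]); s.take i ++ s.drop (i+1) is numStr[:i] + numStr[i+1:],
-- s.dropLast is numStr[:-1]
def deleteWorstAltGo (s : List Char) (i : Nat) : List Char :=
  if _h : i < s.length - 1 then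
    if pvIntOfChar (s.getD i ' ') < pvIntOfChar (s.getD (i + 1) ' ') then
      s.take i ++ s.drop (i + 1)
    else deleteWorstAltGo s (i + 1)
  else s.dropLast
termination_by s.length - i

def deleteWorst_alt (numStr : String) : String := String.ofList (deleteWorstAltGo numStr.toList 0)

-- ===== PRECONDITION & SPEC =====
-- Pre_ = exactly the inputs where Python A returns: numStr nonempty, and either a single character,
-- or all digits, or some ascent s[i] < s[i+1] whose whole prefix s[0..i+1] is digits (so the walk
-- stops there before reaching any non-digit conversion); elsewhere A raises IndexError/ValueError.
def preCheck_deleteWorst (L : List Char) : Bool :=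
  !L.isEmpty &&
    (L.length == 1 || L.all Char.isDigit ||
      (List.range L.length).any (fun i =>
        decide (i + 1 < L.length) &&
        ((List.range (i + 2)).all fun k => (L.getD k ' ').isDigit) &&
        decide (L.getD i ' ' < L.getD (i + 1) ' ')))
def Pre_deleteWorst (numStr : String) : Prop := preCheck_deleteWorst numStr.toList = true
instance (numStr : String) : Decidable (Pre_deleteWorst numStr) := by
  unfold Pre_deleteWorst; infer_instance

def pvWitness_deleteWorst : String := "321"

def Spec_deleteWorst (numStr : String) (out : String) : Prop := out = deleteWorst_alt numStr
instance (numStr : String) (out : String) : Decidable (Spec_deleteWorst numStr out) := by unfold Spec_deleteWorst; infer_instance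

-- ===== CLAIM (what is proved, stated in full; the proofs are below) =====
def Claim_equal_deleteWorst : Prop := ∀ (numStr : String), Dom_deleteWorst numStr → Pre_deleteWorst numStr → Spec_deleteWorst numStr (deleteWorst numStr)

-- ===== LEMMAS AND PROOFS =====

-- shifting B's scan past a leading character
theorem altGo_cons (c : Char) (rest : List Char) (i : Nat) (hne : rest ≠ []) :
    deleteWorstAltGo (c :: rest) (i + 1) = c :: deleteWorstAltGo rest i := by
  have hlen : rest.length ≥ 1 := by cases rest with
    | nil => exact absurd rfl hne
    | cons a l => simp
  induction hn : rest.length - i generalizing i with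
  | zero =>
      conv_lhs => rw [deleteWorstAltGo]
      conv_rhs => rw [deleteWorstAltGo]
      rw [dif_neg (by simp; omega), dif_neg (by omega)]
      cases rest with
      | nil => exact absurd rfl hne
      | cons a l => simp
  | succ n ih =>
      conv_lhs => rw [deleteWorstAltGo]
      conv_rhs => rw [deleteWorstAltGo]
      by_cases hlt : i < rest.length - 1
      · rw [dif_pos (by simp; omega), dif_pos (by omega)]
        simp only [List.getD_cons_succ]
        by_cases hc : pvIntOfChar (rest.getD i ' ') < pvIntOfChar (rest.getD (i + 1) ' ')
        · rw [if_pos hc, if_pos hc]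
          simp [List.take_succ_cons, List.drop_succ_cons]
        · rw [if_neg hc, if_neg hc]
          exact ih (i + 1) (by omega)
      · rw [dif_neg (by simp; omega), dif_neg (by omega)]
        cases rest with
        | nil => exact absurd rfl hne
        | cons a l => simp

theorem aux_eq_altGo (L : List Char) (hne : L ≠ []) :
    deleteWorstAux L = deleteWorstAltGo L 0 := by
  induction L with
  | nil => exact absurd rfl hne
  | cons h rest ih =>
      cases rest with
      | nil =>
          rw [deleteWorstAux, deleteWorstAltGo]
          rw [dif_neg (by simp)]
          simp
      | cons t0 t =>
          rw [deleteWorstAux, deleteWorstAltGo]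
          rw [dif_pos (by simp)]
          simp only [List.getD_cons_zero, List.getD_cons_succ]
          by_cases hc : pvIntOfChar h ≥ pvIntOfChar t0
          · rw [if_pos hc, if_neg (by omega)]
            rw [altGo_cons h (t0 :: t) 0 (by simp)]
            rw [ih (by simp)]
          · rw [if_neg hc, if_pos (by omega)]
            simp

-- ===== VERDICT (by name: the statement is the Claim_ definition above) =====
theorem deleteWorst_spec : Claim_equal_deleteWorst := by
  intro numStr _ hpre
  have hne : numStr.toList ≠ [] := by
    rw [Pre_deleteWorst, preCheck_deleteWorst, Bool.and_eq_true] at hpre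
    simpa using hpre.1
  unfold Spec_deleteWorst deleteWorst deleteWorst_alt
  exact congrArg String.ofList (aux_eq_altGo _ hne)
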